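-- pv_equiv track=rewrite | github.com/mrTwice/GB_HomeWork | IntroToPython/seminar_004/balls_from_stack.py | schet
-- ===== SOURCE A (Python) =====
-- import itertools
--
-- min_len = 3
--
-- def schet(kolvo: list, res = 0) -> int:
--     c = 0
--     for num, group in itertools.groupby(kolvo):
--         lg = len(list(group))
--         c += lg
--         if lg >= min_len:
--             return schet(kolvo[:c-lg]+kolvo[c:], res+lg)
--     return res
-- ===== SOURCE B (Python) =====
-- def schet(kolvo: list, res=0) -> int:
--     # Single pass with a stack of [value, count]; a finished run of length >= 3
--     # is removed on the spot and its neighbours merge (O(n) instead of A's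
--     # repeated rescans from the start).
--     stack = []
--     removed = 0
--     for x in kolvo:
--         if stack and stack[-1][0] == x:
--             stack[-1][1] += 1
--         else:
--             if stack and stack[-1][1] >= 3:
--                 removed += stack[-1][1]
--                 stack.pop()
--             if stack and stack[-1][0] == x:
--                 stack[-1][1] += 1
--             else:
--                 stack.append([x, 1])
--     if stack and stack[-1][1] >= 3:
--         removed += stack[-1][1]
--     return res + removed
-- ===== Notes on version B (the rewrite author's own statement) =====
-- stated objective: faster
-- what changed: A repeatedly re-runs groupby from scratch and rebuilds the list after removing the first run of length >= 3; B makes a single left-to-right pass keeping a stack of (value, run-length) pairs, flushing a completed run of length >= 3 on the spot and merging its neighbours.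
import Mathlib
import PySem

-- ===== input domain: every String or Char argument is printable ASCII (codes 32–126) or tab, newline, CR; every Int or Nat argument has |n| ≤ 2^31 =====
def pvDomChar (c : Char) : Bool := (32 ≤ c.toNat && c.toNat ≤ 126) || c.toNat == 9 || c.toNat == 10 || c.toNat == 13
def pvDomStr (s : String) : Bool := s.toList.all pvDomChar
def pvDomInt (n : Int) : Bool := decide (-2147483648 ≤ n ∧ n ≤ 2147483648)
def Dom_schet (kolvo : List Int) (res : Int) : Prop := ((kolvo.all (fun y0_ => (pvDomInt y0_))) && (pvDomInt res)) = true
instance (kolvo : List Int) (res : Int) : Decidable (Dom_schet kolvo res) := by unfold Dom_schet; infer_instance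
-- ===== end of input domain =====

-- B replaces A's restart-from-scratch recursion by a single left-to-right pass with a
-- stack of (value, run-length) pairs (objective: faster, asymptotic).

-- ===== PORT A =====
-- itertools.groupby over a list of ints: the (value, run-length) groups, left to right.
def groupsCons (x : Int) : List (Int × Int) → List (Int × Int)
  | (v, c) :: gs => if x = v then (v, c + 1) :: gs else (x, 1) :: (v, c) :: gs
  | [] => [(x, 1)]

def groupsOf : List Int → List (Int × Int)
  | [] => []
  | x :: xs => groupsCons x (groupsOf xs)

-- A's for-loop with its running total c and early return: first group with length >= 3,
-- returning (c after adding it, its length).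
def findBig : List (Int × Int) → Int → Option (Int × Int)
  | [], _ => none
  | (_, lg) :: gs, c => if 3 ≤ lg then some (c + lg, lg) else findBig gs (c + lg)

def sumC (gs : List (Int × Int)) : Int := (gs.map Prod.snd).sum

-- termination facts for schet (cited by its decreasing_by)
theorem sumC_nonneg : ∀ (gs : List (Int × Int)), (∀ g ∈ gs, (0:Int) ≤ g.2) → (0:Int) ≤ sumC gs := by
  intro gs
  induction gs with
  | nil => intro _; simp [sumC]
  | cons a as ih =>
    intro hp
    have h1 : (0:Int) ≤ a.2 := hp a (by simp)
    have h2 := ih (fun g hg => hp g (by simp [hg]))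
    simp only [sumC, List.map_cons, List.sum_cons] at *
    omega

theorem findBig_facts : ∀ (gs : List (Int × Int)) (c0 c lg : Int),
    findBig gs c0 = some (c, lg) → (∀ g ∈ gs, 0 ≤ g.2) →
    3 ≤ lg ∧ c0 + lg ≤ c ∧ c ≤ c0 + sumC gs := by
  intro gs
  induction gs with
  | nil => intro c0 c lg h _; simp [findBig] at h
  | cons g gs ih =>
    intro c0 c lg h hpos
    obtain ⟨v, d⟩ := g
    simp only [findBig] at h
    have hsum : sumC ((v, d) :: gs) = d + sumC gs := by simp [sumC]
    by_cases h3 : (3:Int) ≤ d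
    · simp [h3] at h
      have hrest : (0:Int) ≤ sumC gs := sumC_nonneg gs (fun g hg => hpos g (by simp [hg]))
      obtain ⟨hc, hl⟩ := h
      omega
    · simp [h3] at h
      have hd : (0:Int) ≤ d := hpos (v, d) (by simp)
      have := ih (c0 + d) c lg h (fun g hg => hpos g (by simp [hg]))
      omega

theorem groupsOf_pos : ∀ (xs : List Int), ∀ g ∈ groupsOf xs, 1 ≤ g.2 := by
  intro xs
  induction xs with
  | nil => simp [groupsOf]
  | cons x xs ih =>
    intro g hg
    simp only [groupsOf, groupsCons] at hg
    rcases hh : groupsOf xs with _ | ⟨⟨v, c⟩, gs⟩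
    · rw [hh] at hg; simp at hg; simp [hg]
    · rw [hh] at hg
      by_cases hx : x = v
      · simp [hx] at hg
        rcases hg with h | h
        · have := ih (v, c) (by rw [hh]; simp)
          simp at this; simp [h]; omega
        · exact ih g (by rw [hh]; simp [h])
      · simp [hx] at hg
        rcases hg with h | h | h
        · simp [h]
        · exact ih g (by rw [hh]; simp [h])
        · exact ih g (by rw [hh]; simp [h])

theorem sumC_groupsOf : ∀ (xs : List Int), sumC (groupsOf xs) = (xs.length : Int) := by
  intro xs
  induction xs with
  | nil => simp [groupsOf, sumC]
  | cons x xs ih =>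
    simp only [groupsOf]
    rcases hh : groupsOf xs with _ | ⟨⟨v, c⟩, gs⟩ <;> simp only [groupsCons]
    · rw [hh] at ih; simp only [sumC, List.map, List.sum_nil, List.sum_cons, List.length_cons] at ih ⊢; omega
    · rw [hh] at ih
      by_cases hx : x = v
      · simp [hx, sumC] at ih ⊢; omega
      · simp [hx, sumC] at ih ⊢; omega

theorem schet_dec (kolvo : List Int) (c lg : Int)
    (h : findBig (groupsOf kolvo) 0 = some (c, lg)) :
    (PySem.List.slice kolvo none (some (c - lg)) ++ PySem.List.slice kolvo (some c) none).length
      < kolvo.length := by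
  have hpos := groupsOf_pos kolvo
  have hf := findBig_facts (groupsOf kolvo) 0 c lg h (fun g hg => by have := hpos g hg; omega)
  rw [sumC_groupsOf] at hf
  obtain ⟨h3, hle, hub⟩ := hf
  have h1 : c - lg = (((c - lg).toNat : Nat) : Int) := by omega
  have h2 : c = ((c.toNat : Nat) : Int) := by omega
  rw [h1, PySem.List.slice_to_natCast, h2, PySem.List.slice_from_natCast]
  simp only [List.length_append, List.length_take, List.length_drop]
  omega

-- A, literally: loop over groupby; on the first group of length >= 3 return
-- schet(kolvo[:c-lg] + kolvo[c:], res+lg); if the loop finishes, return res.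
def schet (kolvo : List Int) (res : Int) : Int :=
  match hfb : findBig (groupsOf kolvo) 0 with
  | none => res
  | some (c, lg) =>
      schet (PySem.List.slice kolvo none (some (c - lg)) ++ PySem.List.slice kolvo (some c) none)
        (res + lg)
termination_by kolvo.length
decreasing_by exact schet_dec kolvo c lg hfb

-- ===== PORT B =====
-- one step of Source B's loop body; the Python stack's top stack[-1] is the list head here
def stepB : List (Int × Int) × Int → Int → List (Int × Int) × Int
  | ((v, c) :: st, r), x =>
    if v = x then ((v, c + 1) :: st, r)
    else if 3 ≤ c then
      match st with
      | (u, d) :: st' => if u = x then ((u, d + 1) :: st', r + c) else ((x, 1) :: (u, d) :: st', r + c)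
      | [] => ([(x, 1)], r + c)
    else ((x, 1) :: (v, c) :: st, r)
  | ([], r), x => ([(x, 1)], r)

-- Source B's final flush of the stack top
def finishB : List (Int × Int) × Int → Int
  | ((_, c) :: _, r) => if 3 ≤ c then r + c else r
  | ([], r) => r

def schet_alt (kolvo : List Int) (res : Int) : Int :=
  res + finishB (kolvo.foldl stepB ([], 0))

-- ===== PRECONDITION & SPEC =====
def Spec_schet (kolvo : List Int) (res : Int) (out : Int) : Prop := out = schet_alt kolvo res
instance (kolvo : List Int) (res : Int) (out : Int) : Decidable (Spec_schet kolvo res out) := by unfold Spec_schet; infer_instance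

-- ===== CLAIM (what is proved, stated in full; the proofs are below) =====
def Claim_equal_schet : Prop := ∀ (kolvo : List Int) (res : Int), Dom_schet kolvo res → Spec_schet kolvo res (schet kolvo res)

-- ===== LEMMAS AND PROOFS =====

-- concatenation of the groups back into a flat list
def fromGroups : List (Int × Int) → List Int
  | [] => []
  | (v, c) :: gs => List.replicate c.toNat v ++ fromGroups gs

-- adjacent groups carry distinct values
theorem groupsOf_chain : ∀ (xs : List Int), (groupsOf xs).IsChain (fun a b => a.1 ≠ b.1) := by
  intro xs
  induction xs with
  | nil => simp [groupsOf]
  | cons x xs ih =>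
    simp only [groupsOf]
    rcases hh : groupsOf xs with _ | ⟨⟨v, c⟩, gs⟩ <;> simp only [groupsCons]
    · simp
    · rw [hh] at ih
      by_cases hx : x = v
      · rw [if_pos hx]
        rcases gs with _ | ⟨⟨w, e⟩, gs'⟩
        · simp
        · rw [List.isChain_cons_cons] at ih ⊢; exact ih
      · rw [if_neg hx]
        rw [List.isChain_cons_cons]
        exact ⟨hx, ih⟩

theorem fromGroups_groupsOf : ∀ (xs : List Int), fromGroups (groupsOf xs) = xs := by
  intro xs
  induction xs with
  | nil => rfl
  | cons x xs ih =>
    simp only [groupsOf]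
    rcases hh : groupsOf xs with _ | ⟨⟨v, c⟩, gs⟩ <;> simp only [groupsCons]
    · rw [hh] at ih
      simp only [fromGroups] at ih ⊢
      simp [← ih]
    · rw [hh] at ih
      have hc : (1:Int) ≤ c := by
        have := groupsOf_pos xs (v, c) (by rw [hh]; simp); simpa using this
      by_cases hx : x = v
      · rw [if_pos hx]
        simp only [fromGroups] at ih ⊢
        have ht : (c + 1).toNat = c.toNat + 1 := by omega
        rw [ht, List.replicate_succ]
        simp [ih, hx]
      · rw [if_neg hx]
        simp only [fromGroups] at ih ⊢
        simp [ih]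

theorem fromGroups_append : ∀ (gs1 gs2 : List (Int × Int)),
    fromGroups (gs1 ++ gs2) = fromGroups gs1 ++ fromGroups gs2 := by
  intro gs1
  induction gs1 with
  | nil => intro gs2; rfl
  | cons g gs ih =>
    intro gs2
    obtain ⟨v, c⟩ := g
    simp [fromGroups, ih, List.append_assoc]

theorem length_fromGroups : ∀ (gs : List (Int × Int)), (∀ g ∈ gs, (0:Int) ≤ g.2) →
    ((fromGroups gs).length : Int) = sumC gs := by
  intro gs
  induction gs with
  | nil => intro _; simp [fromGroups, sumC]
  | cons g gs ih =>
    intro hp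
    obtain ⟨v, c⟩ := g
    have h1 : (0:Int) ≤ c := hp (v, c) (by simp)
    have h2 := ih (fun g hg => hp g (by simp [hg]))
    simp only [fromGroups, List.length_append, List.length_replicate, sumC, List.map_cons,
      List.sum_cons] at *
    push_cast
    omega

-- the removed-counter r is only ever added to: it can be split off
theorem stepB_shift : ∀ (st : List (Int × Int)) (r a x : Int),
    stepB (st, r + a) x = ((stepB (st, r) x).1, (stepB (st, r) x).2 + a) := by
  intro st r a x
  rcases st with _ | ⟨⟨v, c⟩, st⟩
  · simp [stepB]
  · simp only [stepB]
    by_cases h1 : v = x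
    · simp [h1]
    · simp only [if_neg h1]
      by_cases h2 : (3:Int) ≤ c
      · simp only [if_pos h2]
        rcases st with _ | ⟨⟨u, d⟩, st'⟩
        · simp; ring
        · by_cases h3 : u = x
          · simp [h3]; ring
          · simp [h3]; ring
      · simp [h2]

theorem foldl_shift : ∀ (l : List Int) (st : List (Int × Int)) (r a : Int),
    List.foldl stepB (st, r + a) l
      = ((List.foldl stepB (st, r) l).1, (List.foldl stepB (st, r) l).2 + a) := by
  intro l
  induction l with
  | nil => intro st r a; simp
  | cons x l ih =>
    intro st r a
    simp only [List.foldl_cons]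
    rw [stepB_shift]
    rw [ih]

theorem finishB_shift : ∀ (st : List (Int × Int)) (r a : Int),
    finishB (st, r + a) = finishB (st, r) + a := by
  intro st r a
  rcases st with _ | ⟨⟨v, c⟩, st⟩
  · simp [finishB]
  · by_cases h : (3:Int) ≤ c
    · simp [finishB, h]; ring
    · simp [finishB, h]

-- the stack top does not block an incoming x: different value, count below 3
def topOK (v : Int) (st : List (Int × Int)) : Prop :=
  match st with | [] => True | (u, d) :: _ => u ≠ v ∧ d < 3

theorem run_merge : ∀ (k : Nat) (v c : Int) (st : List (Int × Int)) (r : Int),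
    List.foldl stepB ((v, c) :: st, r) (List.replicate k v) = ((v, c + (k:Int)) :: st, r) := by
  intro k
  induction k with
  | zero => intro v c st r; simp
  | succ k ih =>
    intro v c st r
    rw [List.replicate_succ, List.foldl_cons]
    have h1 : stepB ((v, c) :: st, r) v = ((v, c + 1) :: st, r) := by simp [stepB]
    rw [h1, ih]
    have : c + 1 + (k:Int) = c + ((k+1 : Nat) : Int) := by push_cast; ring
    rw [this]

theorem run_push : ∀ (k : Nat) (v : Int) (st : List (Int × Int)) (r : Int), topOK v st →
    List.foldl stepB (st, r) (List.replicate (k + 1) v) = ((v, 1 + (k:Int)) :: st, r) := by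
  intro k v st r h
  rw [List.replicate_succ, List.foldl_cons]
  have h1 : stepB (st, r) v = ((v, 1) :: st, r) := by
    rcases st with _ | ⟨⟨u, d⟩, st'⟩
    · simp [stepB]
    · obtain ⟨hu, hd⟩ := h
      simp [stepB, hu, show ¬(3:Int) ≤ d from by omega]
  rw [h1, run_merge]

-- the next group (if any) is not blocked by the stack top
def link (st gs : List (Int × Int)) : Prop :=
  match gs with | [] => True | g :: _ => topOK g.1 st

theorem link_nil : ∀ gs : List (Int × Int), link [] gs := by
  intro gs; cases gs with
  | nil => trivial
  | cons g gs => trivial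

-- folding a stretch whose groups are all short just stacks the groups, removing nothing
theorem fold_small : ∀ (gs st : List (Int × Int)) (r : Int),
    (∀ g ∈ gs, 1 ≤ g.2 ∧ g.2 < 3) → gs.IsChain (fun a b => a.1 ≠ b.1) → link st gs →
    List.foldl stepB (st, r) (fromGroups gs) = (gs.reverse ++ st, r) := by
  intro gs
  induction gs with
  | nil => intro st r _ _ _; simp [fromGroups]
  | cons g gs ih =>
    intro st r hcnt hch hlink
    obtain ⟨u, j⟩ := g
    obtain ⟨hj1, hj3⟩ := hcnt (u, j) (by simp)
    simp only [fromGroups, List.foldl_append]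
    have hk : j.toNat = (j.toNat - 1) + 1 := by omega
    rw [hk, run_push _ _ _ _ hlink]
    have hc : (1:Int) + ((j.toNat - 1 : Nat) : Int) = j := by omega
    rw [hc]
    have hlink' : link ((u, j) :: st) gs := by
      rcases gs with _ | ⟨⟨w, e⟩, gs'⟩
      · trivial
      · have := (List.isChain_cons_cons.mp hch).1
        exact ⟨this, hj3⟩
    rw [ih ((u, j) :: st) r (fun g hg => hcnt g (by simp [hg]))
        (by cases gs with
            | nil => simp
            | cons g' gs' => exact (List.isChain_cons_cons.mp hch).2) hlink']
    simp

-- key step: a maximal run of length lg ≥ 3 contributes exactly lg and otherwise vanishes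
theorem main_gen : ∀ (s : List Int) (st : List (Int × Int)) (r lg v : Int),
    3 ≤ lg → topOK v st → (∀ w, s.head? = some w → w ≠ v) →
    finishB (List.foldl stepB (st, r) (List.replicate lg.toNat v ++ s))
      = lg + finishB (List.foldl stepB (st, r) s) := by
  intro s st r lg v h3 htop hhd
  rw [List.foldl_append]
  have hk : lg.toNat = (lg.toNat - 1) + 1 := by omega
  rw [hk, run_push _ _ _ _ htop]
  have hc : (1:Int) + ((lg.toNat - 1 : Nat) : Int) = lg := by omega
  rw [hc]
  rcases s with _ | ⟨w, s'⟩
  · simp only [List.foldl_nil]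
    rcases st with _ | ⟨⟨u, d⟩, st'⟩
    · simp [finishB, h3]; ring
    · have hd : d < 3 := htop.2
      simp [finishB, h3, show ¬(3:Int) ≤ d from by omega]
      ring
  · have hw : w ≠ v := hhd w rfl
    simp only [List.foldl_cons]
    have hstep : stepB ((v, lg) :: st, r) w = ((stepB (st, r) w).1, (stepB (st, r) w).2 + lg) := by
      have hvw : ¬ v = w := fun h => hw h.symm
      rcases st with _ | ⟨⟨u, d⟩, st'⟩
      · simp [stepB, hvw, h3]
      · obtain ⟨hu, hd⟩ := htop
        by_cases huw : u = w
        · simp [stepB, hvw, h3, huw]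
        · simp [stepB, hvw, h3, huw, show ¬(3:Int) ≤ d from by omega]
    rw [hstep]
    have hsh := foldl_shift s' (stepB (st, r) w).1 (stepB (st, r) w).2 lg
    rw [hsh]
    have hfin := finishB_shift (List.foldl stepB (stepB (st, r) w) s').1
      (List.foldl stepB (stepB (st, r) w) s').2 lg
    simp only [Prod.mk.eta] at hsh hfin ⊢
    rw [hfin]
    ring

theorem findBig_none_small : ∀ (gs : List (Int × Int)) (c0 : Int),
    findBig gs c0 = none → ∀ g ∈ gs, g.2 < 3 := by
  intro gs
  induction gs with
  | nil => intro c0 _; simp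
  | cons g gs ih =>
    intro c0 h
    obtain ⟨v, d⟩ := g
    simp only [findBig] at h
    by_cases h3 : (3:Int) ≤ d
    · simp [h3] at h
    · simp only [if_neg h3] at h
      intro g hg
      rcases List.mem_cons.mp hg with hg | hg
      · simp [hg]; omega
      · exact ih _ h g hg

theorem findBig_some_decomp : ∀ (gs : List (Int × Int)) (c0 c lg : Int),
    findBig gs c0 = some (c, lg) →
    ∃ gs1 v gs2, gs = gs1 ++ (v, lg) :: gs2 ∧ (∀ g ∈ gs1, g.2 < 3) ∧ 3 ≤ lg
      ∧ c = c0 + sumC gs1 + lg := by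
  intro gs
  induction gs with
  | nil => intro c0 c lg h; simp [findBig] at h
  | cons g gs ih =>
    intro c0 c lg h
    obtain ⟨v, d⟩ := g
    simp only [findBig] at h
    by_cases h3 : (3:Int) ≤ d
    · simp [h3] at h
      obtain ⟨hc, hl⟩ := h
      refine ⟨[], v, gs, by simp [← hl], by simp, by omega, by simp [sumC]; omega⟩
    · simp only [if_neg h3] at h
      obtain ⟨gs1, w, gs2, hdec, hsm, hlg, hc⟩ := ih _ _ _ h
      refine ⟨(v, d) :: gs1, w, gs2, by simp [hdec], ?_, hlg, ?_⟩
      · intro g hg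
        rcases List.mem_cons.mp hg with hg | hg
        · simp [hg]; omega
        · exact hsm g hg
      · simp [sumC] at hc ⊢
        omega

theorem schet_eq : ∀ (n : Nat) (kolvo : List Int) (res : Int), kolvo.length ≤ n →
    schet kolvo res = res + finishB (List.foldl stepB ([], 0) kolvo) := by
  intro n
  induction n with
  | zero =>
    intro kolvo res hlen
    have hk : kolvo = [] := by
      cases kolvo with | nil => rfl | cons a l => simp at hlen
    subst hk
    simp [schet, groupsOf, findBig, finishB]
  | succ n ih =>
    intro kolvo res hlen
    rw [schet.eq_def]
    split
    next hfb =>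
      have hsmall := findBig_none_small _ _ hfb
      have hpos := groupsOf_pos kolvo
      have hchain := groupsOf_chain kolvo
      have h1 : List.foldl stepB ([], 0) kolvo = ((groupsOf kolvo).reverse, 0) := by
        conv_lhs => rw [← fromGroups_groupsOf kolvo]
        have := fold_small (groupsOf kolvo) [] 0 (fun g hg => ⟨hpos g hg, hsmall g hg⟩) hchain (link_nil _)
        simpa using this
      rw [h1]
      rcases hrev : (groupsOf kolvo).reverse with _ | ⟨⟨u, d⟩, rest⟩
      · simp [finishB]
      · have hmem : (u, d) ∈ groupsOf kolvo := by
          rw [← List.mem_reverse, hrev]; simp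
        have hd := hsmall _ hmem
        simp only at hd
        simp [finishB, show ¬(3:Int) ≤ d from by omega]
    next c lg hfb =>
      obtain ⟨gs1, v, gs2, hdec, hsm1, h3, hc⟩ := findBig_some_decomp _ _ _ _ hfb
      have hpos := groupsOf_pos kolvo
      have hchain := groupsOf_chain kolvo
      rw [hdec] at hchain
      rw [List.isChain_append] at hchain
      obtain ⟨hch1, hch2, hbd⟩ := hchain
      have hpos1 : ∀ g ∈ gs1, (1:Int) ≤ g.2 := fun g hg => hpos g (by rw [hdec]; simp [hg])
      have hpos2 : ∀ g ∈ gs2, (1:Int) ≤ g.2 := fun g hg => hpos g (by rw [hdec]; simp [hg])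
      have hk : kolvo = fromGroups gs1 ++ (List.replicate lg.toNat v ++ fromGroups gs2) := by
        conv_lhs => rw [← fromGroups_groupsOf kolvo]
        rw [hdec, fromGroups_append]
        simp [fromGroups]
      have hlen1 : ((fromGroups gs1).length : Int) = sumC gs1 :=
        length_fromGroups _ (fun g hg => by have := hpos1 g hg; omega)
      have hcl : c - lg = (((fromGroups gs1).length : Nat) : Int) := by
        rw [hlen1]; omega
      have hslice1 : PySem.List.slice kolvo none (some (c - lg)) = fromGroups gs1 := by
        rw [hcl, PySem.List.slice_to_natCast, hk]
        exact List.take_left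
      have hslice2 : PySem.List.slice kolvo (some c) none = fromGroups gs2 := by
        have hcc : c = ((((fromGroups gs1).length + lg.toNat : Nat)) : Int) := by
          push_cast; omega
        rw [hcc, PySem.List.slice_from_natCast, hk, ← List.append_assoc]
        have hl : (fromGroups gs1).length + lg.toNat
            = (fromGroups gs1 ++ List.replicate lg.toNat v).length := by simp
        rw [hl, List.drop_left]
      have hlt : (fromGroups gs1 ++ fromGroups gs2).length ≤ n := by
        have := congrArg List.length hk
        simp only [List.length_append, List.length_replicate] at this
        simp only [List.length_append]
        omega
      rw [hslice1, hslice2, ih _ _ hlt]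
      -- both folds share the prefix over fromGroups gs1
      have hA : List.foldl stepB ([], 0) (fromGroups gs1) = (gs1.reverse, 0) := by
        have := fold_small gs1 [] 0 (fun g hg => ⟨hpos1 g hg, hsm1 g hg⟩) hch1 (link_nil _)
        simpa using this
      have htop : topOK v gs1.reverse := by
        rcases hrev : gs1.reverse with _ | ⟨⟨u, d⟩, rest⟩
        · trivial
        · have hmem : (u, d) ∈ gs1 := by rw [← List.mem_reverse, hrev]; simp
          have hlast : gs1.getLast? = some (u, d) := by
            rw [← List.head?_reverse, hrev]; rfl
          have hne : (u, d).1 ≠ ((v, lg) : Int × Int).1 := by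
            exact hbd (u, d) (by simp [hlast]) (v, lg) (by simp)
          exact ⟨hne, hsm1 _ hmem⟩
      have hhd : ∀ w, (fromGroups gs2).head? = some w → w ≠ v := by
        rcases gs2 with _ | ⟨⟨w0, e⟩, gs2'⟩
        · intro w hw; simp [fromGroups] at hw
        · intro w hw
          have he : (1:Int) ≤ e := hpos2 (w0, e) (by simp)
          have het : e.toNat = (e.toNat - 1) + 1 := by omega
          simp only [fromGroups] at hw
          rw [het] at hw
          simp only [List.replicate_succ, List.cons_append, List.head?_cons,
            Option.some.injEq] at hw
          have hvw : ((v, lg) : Int × Int).1 ≠ ((w0, e) : Int × Int).1 :=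
            (List.isChain_cons_cons.mp hch2).1
          simp only at hvw
          omega
      have hmg := main_gen (fromGroups gs2) gs1.reverse 0 lg v h3 htop hhd
      rw [hk, List.foldl_append, hA, List.foldl_append, hA, hmg]
      omega

-- ===== VERDICT (by name: the statement is the Claim_ definition above) =====
theorem schet_spec : Claim_equal_schet := by
  intro kolvo res _
  unfold Spec_schet schet_alt
  exact schet_eq kolvo.length kolvo res le_rfl
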